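-- pv_equiv track=rewrite | github.com/ysirblack/why-quran-is-miracle | miracles/01_surah_parity_groups/honest_combined_probability_calculator.py | check_pattern_07_prime_factor_sum
-- ===== SOURCE A (Python) =====
-- from typing import Dict, List
--
-- def check_pattern_07_prime_factor_sum(verse_counts: Dict[int, int]) -> int:
--     """Pattern 07: Prime Factor Sum parity matching (71/71, 43/43)"""
--     def pfs(n):
--         if n == 1:
--             return 1
--         total, temp, d = 0, n, 2
--         while d * d <= temp:
--             while temp % d == 0:
--                 total += d
--                 temp //= d
--             d += 1
--         if temp > 1:
--             total += temp
--         return total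
--
--     pos_pfs_odd = sum(1 for p in range(1, 115) if pfs(p) % 2 == 1)
--     verse_pfs_odd = sum(1 for v in verse_counts.values() if pfs(v) % 2 == 1)
--     return abs(verse_pfs_odd - pos_pfs_odd)
-- ===== SOURCE B (Python) =====
-- def check_pattern_07_prime_factor_sum(verse_counts):
--     """Pattern 07 via recursion on the factorization instead of iterative trial division."""
--     def factor_sum(m):
--         if m <= 1:
--             return 0
--         d = 2
--         while d * d <= m:
--             if m % d == 0:
--                 return d + factor_sum(m // d)
--             d += 1
--         return m  # no divisor up to sqrt(m): m itself is the (prime) factor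
--
--     def pfs(n):
--         return 1 if n == 1 else factor_sum(n)
--
--     pos_pfs_odd = sum(1 for p in range(1, 115) if pfs(p) % 2 == 1)
--     verse_pfs_odd = sum(1 for v in verse_counts.values() if pfs(v) % 2 == 1)
--     return abs(verse_pfs_odd - pos_pfs_odd)
-- ===== Notes on version B (the rewrite author's own statement) =====
-- stated objective: alternative
-- what changed: The iterative trial-division pfs (nested while loops carrying total/temp/d accumulator state) is replaced by a recursion on the factorization: a helper scans for the smallest divisor, peels it off once and recurses on the quotient, the pfs(1)=1 special case and the two counting loops staying as in A.
import Mathlib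
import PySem

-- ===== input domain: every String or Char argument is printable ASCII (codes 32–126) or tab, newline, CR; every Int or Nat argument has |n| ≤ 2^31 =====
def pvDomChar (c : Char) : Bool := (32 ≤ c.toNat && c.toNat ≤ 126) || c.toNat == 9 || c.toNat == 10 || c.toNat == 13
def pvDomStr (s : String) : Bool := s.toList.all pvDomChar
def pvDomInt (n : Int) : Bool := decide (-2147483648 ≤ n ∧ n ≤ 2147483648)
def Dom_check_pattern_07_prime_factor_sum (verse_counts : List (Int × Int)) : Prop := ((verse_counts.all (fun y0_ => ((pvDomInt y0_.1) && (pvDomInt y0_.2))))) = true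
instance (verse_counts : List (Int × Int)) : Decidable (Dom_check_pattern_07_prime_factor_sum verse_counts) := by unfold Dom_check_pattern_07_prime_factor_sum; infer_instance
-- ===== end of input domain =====

-- B replaces A's iterative two-while trial-division prime-factor-sum by a recursion on the
-- factorization (smallest-divisor scan, peel one factor, recurse); same value, similar cost.


-- ===== PORT A =====
-- inner 'while temp % d == 0' loop; fuel only makes the recursion total (never exhausted on the fuel the port passes)
def pvInnerA (total temp d : Int) (fuel : Nat) : Int × Int :=
  match fuel with
  | 0 => (total, temp)
  | f + 1 =>
    if PySem.Int.mod temp d = 0 then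
      pvInnerA (total + d) (PySem.Int.floordiv temp d) d f
    else (total, temp)

-- outer 'while d * d <= temp' loop
def pvOuterA (total temp d : Int) (fuel : Nat) : Int × Int :=
  match fuel with
  | 0 => (total, temp)
  | f + 1 =>
    if d * d ≤ temp then
      let s := pvInnerA total temp d f
      pvOuterA s.1 s.2 (d + 1) f
    else (total, temp)

-- A's local pfs
def pvPfsA (n : Int) : Int :=
  if n = 1 then 1
  else
    let s := pvOuterA 0 n 2 (2 * n.toNat + 2)
    if 1 < s.2 then s.1 + s.2 else s.1

def check_pattern_07_prime_factor_sum (verse_counts : List (Int × Int)) : Int :=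
  let pos_pfs_odd : Int :=
    (PySem.List.pyRange 1 115 1).foldl
      (fun acc p => if PySem.Int.mod (pvPfsA p) 2 = 1 then acc + 1 else acc) 0
  let verse_pfs_odd : Int :=
    ((PySem.Dict.ofList verse_counts).values).foldl
      (fun acc v => if PySem.Int.mod (pvPfsA v) 2 = 1 then acc + 1 else acc) 0
  |verse_pfs_odd - pos_pfs_odd|

-- ===== PORT B =====
-- B's 'while d * d <= m' scan for the smallest divisor (returns m itself when none)
def pvScanB (m d : Int) (fuel : Nat) : Int :=
  match fuel with
  | 0 => m
  | f + 1 =>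
    if d * d ≤ m then
      (if PySem.Int.mod m d = 0 then d else pvScanB m (d + 1) f)
    else m

-- B's recursive factor_sum: peel the smallest divisor, recurse on the quotient
def pvFacB (m : Int) (fuel : Nat) : Int :=
  match fuel with
  | 0 => 0
  | f + 1 =>
    if m ≤ 1 then 0
    else
      let p := pvScanB m 2 (m.toNat + 1)
      p + pvFacB (PySem.Int.floordiv m p) f

def pvPfsB (n : Int) : Int := if n = 1 then 1 else pvFacB n n.toNat

def check_pattern_07_prime_factor_sum_alt (verse_counts : List (Int × Int)) : Int :=
  let pos_pfs_odd : Int :=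
    (PySem.List.pyRange 1 115 1).foldl
      (fun acc p => if PySem.Int.mod (pvPfsB p) 2 = 1 then acc + 1 else acc) 0
  let verse_pfs_odd : Int :=
    ((PySem.Dict.ofList verse_counts).values).foldl
      (fun acc v => if PySem.Int.mod (pvPfsB v) 2 = 1 then acc + 1 else acc) 0
  |verse_pfs_odd - pos_pfs_odd|

-- ===== PRECONDITION & SPEC =====
def Spec_check_pattern_07_prime_factor_sum (verse_counts : List (Int × Int)) (out : Int) : Prop := out = check_pattern_07_prime_factor_sum_alt verse_counts
instance (verse_counts : List (Int × Int)) (out : Int) : Decidable (Spec_check_pattern_07_prime_factor_sum verse_counts out) := by unfold Spec_check_pattern_07_prime_factor_sum; infer_instance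

-- ===== CLAIM (what is proved, stated in full; the proofs are below) =====
def Claim_equal_check_pattern_07_prime_factor_sum : Prop := ∀ (verse_counts : List (Int × Int)), Dom_check_pattern_07_prime_factor_sum verse_counts → Spec_check_pattern_07_prime_factor_sum verse_counts (check_pattern_07_prime_factor_sum verse_counts)

-- ===== LEMMAS AND PROOFS =====

-- sum of the prime factorization (with multiplicity), as an Int
def pvS (m : Nat) : Int := ((Nat.primeFactorsList m).sum : Int)

theorem pv_pfl_cons {m : Nat} (h : 2 ≤ m) :
    Nat.primeFactorsList m = m.minFac :: Nat.primeFactorsList (m / m.minFac) := by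
  obtain ⟨k, rfl⟩ : ∃ k, m = k + 2 := ⟨m - 2, by omega⟩
  rw [Nat.primeFactorsList]

theorem pv_S_cons {m : Nat} (h : 2 ≤ m) : pvS m = (m.minFac : Int) + pvS (m / m.minFac) := by
  simp [pvS, pv_pfl_cons h]

-- when d ∣ m and nothing in [2, d) divides m, d is the least prime factor
theorem pv_minFac_eq_of_dvd {m d : Nat} (hm : 2 ≤ m) (hd : 2 ≤ d) (hdvd : d ∣ m)
    (hsmall : ∀ e, 2 ≤ e → e < d → ¬ e ∣ m) : m.minFac = d := by
  have h1 : m.minFac ≤ d := Nat.minFac_le_of_dvd hd hdvd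
  have h2 : m.minFac ∣ m := Nat.minFac_dvd m
  have h3 : 2 ≤ m.minFac := (Nat.minFac_prime (by omega)).two_le
  rcases lt_or_ge m.minFac d with h | h
  · exact absurd h2 (hsmall _ h3 h)
  · omega

-- when nothing in [2, d) divides m and m < d*d, m is its own least factor (so m is prime)
theorem pv_minFac_eq_self {m d : Nat} (hm : 2 ≤ m)
    (hsmall : ∀ e, 2 ≤ e → e < d → ¬ e ∣ m) (hlt : m < d * d) : m.minFac = m := by
  by_cases hp : Nat.Prime m
  · exact hp.minFac_eq
  · exfalso
    have hsq : m.minFac ^ 2 ≤ m := Nat.minFac_sq_le_self (by omega) hp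
    have h2 : 2 ≤ m.minFac := (Nat.minFac_prime (by omega)).two_le
    have hge : d ≤ m.minFac := by
      by_contra h
      exact hsmall _ h2 (by omega) (Nat.minFac_dvd m)
    nlinarith [hsq, sq_nonneg m.minFac]

theorem pv_S_self {m d : Nat} (hm : 2 ≤ m)
    (hsmall : ∀ e, 2 ≤ e → e < d → ¬ e ∣ m) (hlt : m < d * d) : pvS m = (m : Int) := by
  have h := pv_minFac_eq_self hm hsmall hlt
  rw [pv_S_cons hm, h, Nat.div_self (by omega)]
  simp [pvS, Nat.primeFactorsList_one]

-- B's scan finds the least prime factor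
theorem pv_scan_eq (f : Nat) : ∀ (m d : Nat), 2 ≤ m → 2 ≤ d →
    (∀ e, 2 ≤ e → e < d → ¬ e ∣ m) → m + 1 ≤ f + d →
    pvScanB (m : Int) (d : Int) f = (m.minFac : Int) := by
  induction f with
  | zero =>
    intro m d hm hd hsmall hfuel
    exfalso
    have h2 : 2 ≤ m.minFac := (Nat.minFac_prime (by omega)).two_le
    have h3 : m.minFac ≤ m := Nat.minFac_le (by omega)
    exact hsmall _ h2 (by omega) (Nat.minFac_dvd m)
  | succ f ih =>
    intro m d hm hd hsmall hfuel
    rw [pvScanB]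
    by_cases hguard : (d : Int) * (d : Int) ≤ (m : Int)
    · rw [if_pos hguard]
      by_cases hdvd : PySem.Int.mod (m : Int) (d : Int) = 0
      · rw [if_pos hdvd]
        have hdm : d ∣ m := by
          rw [PySem.Int.mod_natCast] at hdvd
          exact Nat.dvd_of_mod_eq_zero (by exact_mod_cast hdvd)
        rw [pv_minFac_eq_of_dvd hm hd hdm hsmall]
      · rw [if_neg hdvd]
        have hnd : ¬ d ∣ m := by
          intro h
          exact hdvd (by rw [PySem.Int.mod_natCast, Nat.mod_eq_zero_of_dvd h]; rfl)
        have hsmall' : ∀ e, 2 ≤ e → e < d + 1 → ¬ e ∣ m := by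
          intro e he1 he2
          rcases Nat.lt_succ_iff_lt_or_eq.mp he2 with h | h
          · exact hsmall e he1 h
          · subst h; exact hnd
        have : ((d : Int) + 1) = ((d + 1 : Nat) : Int) := by push_cast; ring
        rw [this]
        exact ih m (d + 1) hm (by omega) hsmall' (by omega)
    · rw [if_neg hguard]
      have hlt : m < d * d := by
        by_contra h
        exact hguard (by exact_mod_cast Nat.le_of_not_lt h)
      exact_mod_cast congrArg (Nat.cast : Nat → Int) (pv_minFac_eq_self hm hsmall hlt).symm

-- B's factor_sum computes pvS
theorem pv_fac_eq (f : Nat) : ∀ (m : Nat), 1 ≤ m → m ≤ f → pvFacB (m : Int) f = pvS m := by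
  induction f with
  | zero => intro m h1 h2; omega
  | succ f ih =>
    intro m h1 h2
    rw [pvFacB]
    by_cases hm1 : m = 1
    · subst hm1
      norm_num [pvS, Nat.primeFactorsList_one]
    · have hm2 : 2 ≤ m := by omega
      rw [if_neg (by exact_mod_cast (by omega : ¬ (m : Int) ≤ 1))]
      have hc2 : ((2 : Nat) : Int) = (2 : Int) := by norm_num
      have hscan : pvScanB (m : Int) 2 (((m : Int)).toNat + 1) = (m.minFac : Int) := by
        rw [show ((m : Int)).toNat = m by simp, ← hc2]
        exact pv_scan_eq (m + 1) m 2 hm2 (by omega) (by intro e he1 he2; omega) (by omega)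
      simp only [hscan, PySem.Int.floordiv_natCast]
      have hp2 : 2 ≤ m.minFac := (Nat.minFac_prime (by omega)).two_le
      have hlt : m / m.minFac < m := Nat.div_lt_self (by omega) (by omega)
      have hpos : 1 ≤ m / m.minFac := (Nat.one_le_div_iff (by omega)).mpr (Nat.minFac_le (by omega))
      rw [ih _ hpos (by omega), pv_S_cons hm2]

-- A's inner loop strips every factor d, moving d's worth of pvS from state to total
theorem pv_inner_eq (f : Nat) : ∀ (m d : Nat) (total : Int), 1 ≤ m → 2 ≤ d →
    (∀ e, 2 ≤ e → e < d → ¬ e ∣ m) → m ≤ f →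
    ∃ m' : Nat, pvInnerA total (m : Int) (d : Int) f = (total + pvS m - pvS m', (m' : Int)) ∧
      1 ≤ m' ∧ m' ≤ m ∧ ¬ d ∣ m' ∧ (∀ e, 2 ≤ e → e < d → ¬ e ∣ m') := by
  induction f with
  | zero => intro m d total h1 _ _ hf; omega
  | succ f ih =>
    intro m d total h1 hd hsmall hf
    rw [pvInnerA]
    by_cases hdvd : PySem.Int.mod (m : Int) (d : Int) = 0
    · rw [if_pos hdvd]
      have hdm : d ∣ m := by
        rw [PySem.Int.mod_natCast] at hdvd
        exact Nat.dvd_of_mod_eq_zero (by exact_mod_cast hdvd)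
      have hm2 : 2 ≤ m := le_trans hd (Nat.le_of_dvd (by omega) hdm)
      have hminfac : m.minFac = d := pv_minFac_eq_of_dvd hm2 hd hdm hsmall
      have hqpos : 1 ≤ m / d := (Nat.one_le_div_iff (by omega)).mpr (Nat.le_of_dvd (by omega) hdm)
      have hqlt : m / d < m := Nat.div_lt_self (by omega) (by omega)
      have hqdvd : m / d ∣ m := Nat.div_dvd_of_dvd hdm
      have hsmall' : ∀ e, 2 ≤ e → e < d → ¬ e ∣ m / d := fun e he1 he2 h =>
        hsmall e he1 he2 (h.trans hqdvd)
      obtain ⟨m', heq, hm'1, hm'2, hm'3, hm'4⟩ := ih (m / d) d (total + d) hqpos hd hsmall' (by omega)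
      refine ⟨m', ?_, hm'1, by omega, hm'3, hm'4⟩
      rw [PySem.Int.floordiv_natCast, heq]
      have hS : pvS m = (d : Int) + pvS (m / d) := by
        have := pv_S_cons hm2
        rwa [hminfac] at this
      rw [hS]; ring_nf
    · rw [if_neg hdvd]
      have hnd : ¬ d ∣ m := by
        intro h
        apply hdvd
        rw [PySem.Int.mod_natCast, Nat.mod_eq_zero_of_dvd h]
        rfl
      exact ⟨m, by ring_nf, h1, le_refl m, hnd, hsmall⟩

-- the final 'if temp > 1: total += temp' tail, when temp has no divisor below d and temp < d*d
theorem pv_tail (m d : Nat) (total : Int) (h1 : 1 ≤ m)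
    (hsmall : ∀ e, 2 ≤ e → e < d → ¬ e ∣ m) (hlt : m < d * d) :
    (if 1 < (m : Int) then total + (m : Int) else total) = total + pvS m := by
  by_cases hm1 : m = 1
  · subst hm1
    norm_num [pvS, Nat.primeFactorsList_one]
  · have hm2 : 2 ≤ m := by omega
    rw [if_pos (by exact_mod_cast hm2 : (1 : Int) < (m : Int)), pv_S_self hm2 hsmall hlt]

-- A's fused loops compute total + pvS temp (with the final 'if temp > 1' tail folded in)
theorem pv_outer_eq (f : Nat) : ∀ (m d : Nat) (total : Int), 1 ≤ m → 2 ≤ d →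
    (∀ e, 2 ≤ e → e < d → ¬ e ∣ m) → m + m + 2 ≤ f + d + d →
    (let s := pvOuterA total (m : Int) (d : Int) f
     if 1 < s.2 then s.1 + s.2 else s.1) = total + pvS m := by
  induction f with
  | zero =>
    intro m d total h1 hd hsmall hf
    simp only [pvOuterA]
    exact pv_tail m d total h1 hsmall (by nlinarith)
  | succ f ih =>
    intro m d total h1 hd hsmall hf
    rw [pvOuterA]
    by_cases hguard : (d : Int) * (d : Int) ≤ (m : Int)
    · rw [if_pos hguard]
      have hguardN : d * d ≤ m := by exact_mod_cast hguard
      have hdd : d + d ≤ m := by nlinarith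
      obtain ⟨m', heq, hm'1, hm'2, hm'3, hm'4⟩ :=
        pv_inner_eq f m d total h1 hd hsmall (by omega)
      have hsmall' : ∀ e, 2 ≤ e → e < d + 1 → ¬ e ∣ m' := by
        intro e he1 he2
        rcases Nat.lt_succ_iff_lt_or_eq.mp he2 with h | h
        · exact hm'4 e he1 h
        · subst h; exact hm'3
      have hcast : ((d : Int) + 1) = ((d + 1 : Nat) : Int) := by push_cast; ring
      have hrec := ih m' (d + 1) (total + pvS m - pvS m') hm'1 (by omega) hsmall' (by omega)
      simp only [heq, hcast]
      simp only at hrec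
      rw [hrec]; ring
    · rw [if_neg hguard]
      have hlt : m < d * d := by
        by_contra h
        exact hguard (by exact_mod_cast Nat.le_of_not_lt h)
      exact pv_tail m d total h1 hsmall hlt

theorem pv_pfs_eq (n : Int) : pvPfsA n = pvPfsB n := by
  unfold pvPfsA pvPfsB
  by_cases h1 : n = 1
  · simp [h1]
  rw [if_neg h1, if_neg h1]
  by_cases hpos : 2 ≤ n
  · obtain ⟨m, rfl⟩ : ∃ m : Nat, n = (m : Int) := ⟨n.toNat, by omega⟩
    have hm : 2 ≤ m := by exact_mod_cast hpos
    have hc2 : ((2 : Nat) : Int) = (2 : Int) := by norm_num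
    have hA := pv_outer_eq (2 * m + 2) m 2 0 (by omega) (by omega)
      (by intro e he1 he2; omega) (by omega)
    rw [hc2] at hA
    simp only at hA
    rw [show ((m : Int)).toNat = m by simp, hA, pv_fac_eq m m (by omega) (le_refl m)]
    ring
  · have hn : n ≤ 0 := by omega
    rw [show n.toNat = 0 by omega]
    simp only [pvOuterA, pvFacB]
    rw [if_neg (by omega : ¬ (2 : Int) * 2 ≤ n)]
    simp only
    rw [if_neg (by omega : ¬ (1 : Int) < n)]

-- ===== VERDICT (by name: the statement is the Claim_ definition above) =====
theorem check_pattern_07_prime_factor_sum_spec : Claim_equal_check_pattern_07_prime_factor_sum := by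
  intro verse_counts _
  unfold Spec_check_pattern_07_prime_factor_sum
  unfold check_pattern_07_prime_factor_sum check_pattern_07_prime_factor_sum_alt
  simp only [funext pv_pfs_eq]
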